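-- pv_equiv track=rewrite | github.com/Diijing/selfStudy | 220215_데일리_윤영훈.py | solution
-- ===== SOURCE A (Python) =====
-- def solution(food_times, k):
--     second = 0
--     flag = True
--     while flag:
--         for i in range(len(food_times)):
--             if food_times[i] == 0:
--                 continue
--             else:
--                 food_times[i] -= 1
--                 second += 1
--                 if second == k:
--                     answer = i + 1
--                     if answer == len(food_times):
--                         answer = 1
--                     else:
--                         answer += 1
--                     flag = False
--                     break
--     return answer
-- ===== SOURCE B (Python) =====
-- def solution(food_times, k):
--     # Round-based: keep (dish index, remaining time) pairs; each full round eats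
--     # one second from every remaining dish, and a dish is removed once its
--     # remaining time reaches 0.  Subtract a whole round's worth of seconds from
--     # k at once and, when k fits inside a round, index the k-th second directly.
--     n = len(food_times)
--     items = [(i, t) for i, t in enumerate(food_times) if t != 0]
--     while k > len(items):
--         k -= len(items)
--         items = [(i, t - 1) for i, t in items if t - 1 != 0]
--     i = items[k - 1][0]
--     return 1 if i + 1 == n else i + 2
-- ===== Notes on version B (the rewrite author's own statement) =====
-- stated objective: simpler
-- what changed: B replaces A's per-second simulation that mutates food_times one decrement at a time by a bulk per-round computation: it keeps (dish index, remaining time) pairs, removes a dish when its remaining time reaches 0, subtracts a whole round's worth of seconds from k at once, and indexes the k-th second directly; Pre_ excludes only the inputs on which A loops forever (k < 1, or k beyond the total eating time with no negative entry).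
import Mathlib
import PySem

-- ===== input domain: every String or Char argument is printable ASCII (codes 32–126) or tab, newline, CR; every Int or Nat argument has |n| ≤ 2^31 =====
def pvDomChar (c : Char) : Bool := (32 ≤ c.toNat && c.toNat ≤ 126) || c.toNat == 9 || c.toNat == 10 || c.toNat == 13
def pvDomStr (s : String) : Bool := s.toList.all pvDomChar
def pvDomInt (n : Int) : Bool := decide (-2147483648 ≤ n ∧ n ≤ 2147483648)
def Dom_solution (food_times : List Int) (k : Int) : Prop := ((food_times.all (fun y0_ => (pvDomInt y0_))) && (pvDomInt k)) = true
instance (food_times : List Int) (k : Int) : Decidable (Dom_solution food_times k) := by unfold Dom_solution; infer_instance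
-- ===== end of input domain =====

-- B replaces A's per-second mutating simulation by a bulk per-round computation over
-- (index, remaining time) pairs (objective: simpler).  A mutates food_times in place;
-- B does not — the equivalence proved here is about the RETURN value only.

-- ===== PORT A =====
-- inner `for i in range(len(food_times))` loop of A, from index i; state (food_times, second);
-- `.inl (ft, second)` = loop finished with flag still True, `.inr ans` = break with answer
def solPass (k : Int) (i : Nat) (ft : List Int) (second : Int) : (List Int × Int) ⊕ Int :=
  if h : i < ft.length then
    let t := ft.getD i 0                    -- food_times[i] (i in range, exact)
    if t = 0 then
      solPass k (i+1) ft second             -- continue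
    else
      let ft' := ft.set i (t - 1)           -- food_times[i] -= 1
      let s' := second + 1                  -- second += 1
      if s' = k then
        let ans : Int := (i : Int) + 1
        .inr (if ans = (ft'.length : Int) then 1 else ans + 1)
      else
        solPass k (i+1) ft' s'
  else
    .inl (ft, second)
termination_by ft.length - i
decreasing_by
· omega
· simp only [List.length_set]; omega

-- the `while flag:` loop; fuel k.toNat suffices on every input where the Python A
-- terminates (each completed pass adds at least one second there); 0 is a junk value
-- on inputs where A diverges (all outside Pre_solution)
def solWhile (k : Int) : Nat → List Int → Int → Int
  | 0, _, _ => 0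
  | fuel+1, ft, second =>
    match solPass k 0 ft second with
    | .inl (ft', s') => solWhile k fuel ft' s'
    | .inr ans => ans

def solution (food_times : List Int) (k : Int) : Int :=
  solWhile k k.toNat food_times 0

-- ===== PORT B =====
-- one round of B: eat a second from every remaining dish, remove those reaching 0
def altStep (items : List (Int × Int)) : List (Int × Int) :=
  items.filterMap (fun p => if p.2 - 1 = 0 then none else some (p.1, p.2 - 1))

-- `while k > len(items):` loop plus the final indexing; fuel as in A
def altLoop (n : Nat) : Nat → Int → List (Int × Int) → Int
  | 0, _, _ => 0
  | fuel+1, k, items =>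
    if (items.length : Int) < k then
      altLoop n fuel (k - (items.length : Int)) (altStep items)
    else
      let i := ((PySem.List.pyGet? items (k - 1)).getD (0, 0)).1   -- items[k-1][0]
      if i + 1 = (n : Int) then 1 else i + 2

def solution_alt (food_times : List Int) (k : Int) : Int :=
  altLoop food_times.length k.toNat k
    ((PySem.List.enumerate food_times 0).filter (fun p => decide (p.2 ≠ 0)))

-- ===== PRECONDITION & SPEC =====
-- Pre_: exactly the inputs on which the Python A terminates: k ≥ 1 (else `second == k`
-- never fires) and enough eating supply (a negative entry is decremented forever, hence
-- infinite supply; otherwise the total of the entries must reach k).  Nothing on which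
-- A returns is excluded.
def Pre_solution (food_times : List Int) (k : Int) : Prop :=
  1 ≤ k ∧ ((∃ t ∈ food_times, t < 0) ∨ k ≤ (food_times.map (fun t => max t 0)).sum)
instance (food_times : List Int) (k : Int) : Decidable (Pre_solution food_times k) := by
  unfold Pre_solution; infer_instance

def pvWitness_solution : List Int × Int := ([3, 1, 2], 5)

def Spec_solution (food_times : List Int) (k : Int) (out : Int) : Prop := out = solution_alt food_times k
instance (food_times : List Int) (k : Int) (out : Int) : Decidable (Spec_solution food_times k out) := by unfold Spec_solution; infer_instance

-- ===== CLAIM (what is proved, stated in full; the proofs are below) =====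
def Claim_equal_solution : Prop := ∀ (food_times : List Int) (k : Int), Dom_solution food_times k → Pre_solution food_times k → Spec_solution food_times k (solution food_times k)

-- ===== LEMMAS AND PROOFS =====

-- value of an entry after r full rounds of A's eating
def decr (r : Int) (t : Int) : Int := if t < 0 then t - r else max (t - r) 0

theorem decr_zero (t : Int) : decr 0 t = t := by
  unfold decr
  by_cases h : t < 0
  · rw [if_pos h]; ring
  · rw [if_neg h]; omega

-- B's item survival-and-value function after r rounds
def gItem (r : Int) (p : Int × Int) : Option (Int × Int) :=
  if decr r p.2 = 0 then none else some (p.1, decr r p.2)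

-- effect of one completed pass of A on the entries
def decOnce (l : List Int) : List Int := l.map (fun t => if t = 0 then t else t - 1)

-- indices (from start index i0) of the nonzero entries
def nzIdxsFrom (i0 : Int) : List Int → List Int
  | [] => []
  | t :: rest => if t = 0 then nzIdxsFrom (i0+1) rest else i0 :: nzIdxsFrom (i0+1) rest

theorem nzIdxsFrom_nil (i0 : Int) : nzIdxsFrom i0 [] = [] := rfl

theorem decOnce_map_decr (r : Int) (hr : 0 ≤ r) (caps : List Int) :
    decOnce (caps.map (decr r)) = caps.map (decr (r+1)) := by
  simp only [decOnce, List.map_map]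
  refine List.map_congr_left (fun t _ => ?_)
  simp only [Function.comp, decr]
  by_cases h : t < 0
  · simp only [if_pos h]
    rw [if_neg (by omega : ¬ (t - r = 0))]; omega
  · simp only [if_neg h]
    by_cases h3 : t ≤ r
    · have hz : max (t - r) 0 = 0 := by omega
      rw [hz, if_pos rfl]; omega
    · have hz : max (t - r) 0 = t - r := by omega
      rw [hz, if_neg (by omega)]; omega

-- one round of B advances the invariant state by one
theorem altStep_gItem (r : Int) (hr : 0 ≤ r) :
    ∀ (l : List (Int × Int)), altStep (l.filterMap (gItem r)) = l.filterMap (gItem (r+1)) := by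
  intro l
  induction l with
  | nil => rfl
  | cons p rest ih =>
    obtain ⟨i, t⟩ := p
    have hsucc : decr r t ≠ 0 → decr r t - 1 = decr (r+1) t := by
      intro h
      simp only [decr] at *
      by_cases hn : t < 0
      · rw [if_pos hn] at *; omega
      · rw [if_neg hn] at *; omega
    have hzero : decr r t = 0 → decr (r+1) t = 0 := by
      intro h
      simp only [decr] at h ⊢
      by_cases hn : t < 0
      · rw [if_pos hn] at h; omega
      · rw [if_neg hn] at *; omega
    by_cases h0 : decr r t = 0
    · simp only [List.filterMap_cons, gItem, if_pos h0, if_pos (hzero h0)]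
      exact ih
    · by_cases h1 : decr (r+1) t = 0
      · simp only [List.filterMap_cons, gItem, if_neg h0, if_pos h1, altStep, hsucc h0]
        simpa [altStep] using ih
      · simp only [List.filterMap_cons, gItem, if_neg h0, if_neg h1, altStep, hsucc h0]
        simpa [altStep] using ih

-- the indices of B's items after r rounds are the nonzero indices of A's decremented list
theorem fst_gItem (r : Int) (hr : 0 ≤ r) :
    ∀ (caps : List Int) (s : Int),
    ((PySem.List.enumerate caps s).filterMap (gItem r)).map Prod.fst
      = nzIdxsFrom s (caps.map (decr r)) := by
  intro caps
  induction caps with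
  | nil => intro s; simp [PySem.List.enumerate_nil, nzIdxsFrom]
  | cons t rest ih =>
    intro s
    rw [PySem.List.enumerate_cons, List.map_cons]
    simp only [nzIdxsFrom, List.filterMap_cons, gItem]
    by_cases h : decr r t = 0
    · rw [if_pos h, if_pos h]
      exact ih (s+1)
    · rw [if_neg h, if_neg h]
      simp only [List.map_cons]
      exact congrArg (List.cons s) (ih (s+1))

-- B's initial item list is the invariant state at round 0
theorem init_gItem : ∀ (l : List (Int × Int)),
    l.filter (fun p => decide (p.2 ≠ 0)) = l.filterMap (gItem 0) := by
  intro l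
  induction l with
  | nil => rfl
  | cons p rest ih =>
    obtain ⟨i, t⟩ := p
    by_cases h : t = 0
    · simp only [List.filter_cons, List.filterMap_cons, gItem, decr_zero, h]
      simp only [decide_true, Bool.not_true, if_pos rfl, decide_not]
      simpa [gItem, decr_zero] using ih
    · simp only [List.filter_cons, List.filterMap_cons, gItem, decr_zero, if_neg h, h,
        decide_not, decide_false, Bool.not_false]
      exact congrArg (List.cons (i, t)) (by simpa [gItem, decr_zero] using ih)

-- characterisation of one pass of A's inner for-loop
theorem solPass_spec (k : Int) :
    ∀ (d : Nat) (ft : List Int) (i : Nat) (s : Int), d = ft.length - i → i ≤ ft.length → s < k →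
    solPass k i ft s =
      (if k - s > ((nzIdxsFrom (i:Int) (ft.drop i)).length : Int) then
        .inl (ft.take i ++ decOnce (ft.drop i), s + ((nzIdxsFrom (i:Int) (ft.drop i)).length : Int))
      else
        .inr (let idx := (nzIdxsFrom (i:Int) (ft.drop i)).getD (k - s - 1).toNat 0;
              if idx + 1 = (ft.length : Int) then 1 else idx + 1 + 1)) := by
  intro d
  induction d with
  | zero =>
    intro ft i s hd hi hs
    rw [solPass]
    rw [dif_neg (by omega)]
    rw [List.drop_eq_nil_iff.mpr (by omega)]
    simp only [nzIdxsFrom_nil, List.length_nil, Nat.cast_zero]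
    rw [if_pos (by omega)]
    simp [decOnce, List.take_of_length_le (by omega : ft.length ≤ i)]
  | succ d ih =>
    intro ft i s hd hi hs
    have hlt : i < ft.length := by omega
    have hdrop : ft.drop i = ft[i] :: ft.drop (i+1) := List.drop_eq_getElem_cons hlt
    have hgetD : ft.getD i 0 = ft[i] := List.getD_eq_getElem ft 0 hlt
    have hcast : ((i+1 : Nat) : Int) = (i : Int) + 1 := by push_cast; ring
    rw [solPass, dif_pos hlt]
    simp only [hgetD]
    by_cases ht : ft[i] = 0
    · -- continue branch
      rw [if_pos ht]
      rw [ih ft (i+1) s (by omega) (by omega) hs]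
      have hnz : nzIdxsFrom (i:Int) (ft.drop i) = nzIdxsFrom ((i:Int)+1) (ft.drop (i+1)) := by
        rw [hdrop]; simp [nzIdxsFrom, ht]
      have htk : ft.take (i+1) ++ decOnce (ft.drop (i+1)) = ft.take i ++ decOnce (ft.drop i) := by
        rw [List.take_succ, hdrop]
        simp only [decOnce, List.map_cons, if_pos ht, List.getElem?_eq_getElem hlt]
        simp [ht]
      rw [hcast, ← hnz, htk]
    · -- eating branch
      rw [if_neg ht]
      have hset : ft.set i (ft[i] - 1) = ft.take i ++ (ft[i] - 1) :: ft.drop (i+1) :=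
        List.set_eq_take_cons_drop _ hlt
      have hlen' : (ft.set i (ft[i] - 1)).length = ft.length := List.length_set
      have hnz : nzIdxsFrom (i:Int) (ft.drop i)
          = (i : Int) :: nzIdxsFrom ((i:Int)+1) (ft.drop (i+1)) := by
        rw [hdrop]; simp [nzIdxsFrom, ht]
      have hltake : (ft.take i).length = i := List.length_take_of_le (by omega)
      by_cases hk : s + 1 = k
      · rw [if_pos hk]
        have hklen : ¬ (k - s > ((nzIdxsFrom (i:Int) (ft.drop i)).length : Int)) := by
          rw [hnz]; simp only [List.length_cons]; push_cast; omega
        rw [if_neg hklen]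
        have hidx : (k - s - 1).toNat = 0 := by omega
        simp only [hnz, hidx, List.getD_cons_zero, hlen']
      · rw [if_neg hk]
        have hs' : s + 1 < k := by omega
        rw [ih (ft.set i (ft[i] - 1)) (i+1) (s+1) (by omega) (by omega) hs']
        have hdrop' : (ft.set i (ft[i] - 1)).drop (i+1) = ft.drop (i+1) := by
          rw [hset, List.drop_append]
          simp [hltake]
        have htake' : (ft.set i (ft[i] - 1)).take (i+1) = ft.take i ++ [ft[i] - 1] := by
          rw [hset, List.take_append]
          simp [hltake, List.take_take]
        rw [hdrop', htake', hcast, hnz, hlen']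
        simp only [List.length_cons]
        set n' : Nat := (nzIdxsFrom ((i:Int)+1) (ft.drop (i+1))).length with hn'
        by_cases hc : k - (s+1) > (n' : Int)
        · rw [if_pos hc, if_pos (show k - s > ((n' + 1 : Nat) : Int) by push_cast; omega)]
          have hdec : decOnce (ft.drop i) = (ft[i] - 1) :: decOnce (ft.drop (i+1)) := by
            rw [hdrop]; simp only [decOnce, List.map_cons, if_neg ht]
          rw [hdec, List.append_assoc, List.singleton_append]
          exact congrArg Sum.inl (Prod.ext rfl (by push_cast; ring))
        · rw [if_neg hc, if_neg (show ¬ k - s > ((n' + 1 : Nat) : Int) by push_cast; omega)]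
          have hidx : (k - s - 1).toNat = (k - (s+1) - 1).toNat + 1 := by omega
          simp only [hidx, List.getD_cons_succ]

-- the while loops run in lockstep, one pass of A per round of B
theorem lockstep (k : Int) :
    ∀ (fuel : Nat) (caps : List Int) (r kB : Int), 0 ≤ r → 1 ≤ kB →
    solWhile k fuel (caps.map (decr r)) (k - kB)
      = altLoop caps.length fuel kB ((PySem.List.enumerate caps 0).filterMap (gItem r)) := by
  intro fuel
  induction fuel with
  | zero => intro caps r kB hr hk; rfl
  | succ fuel ih =>
    intro caps r kB hr hk
    rw [solWhile, altLoop]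
    set items := (PySem.List.enumerate caps 0).filterMap (gItem r) with hitems
    have hfst : items.map Prod.fst = nzIdxsFrom 0 (caps.map (decr r)) := fst_gItem r hr caps 0
    have hlen : items.length = (nzIdxsFrom 0 (caps.map (decr r))).length := by
      rw [← hfst, List.length_map]
    rw [solPass_spec k (caps.map (decr r)).length (caps.map (decr r)) 0 (k - kB) (by omega) (by omega) (by omega)]
    simp only [List.drop_zero, List.take_zero, List.nil_append, CharP.cast_eq_zero]
    by_cases hc : kB ≤ ((nzIdxsFrom 0 (caps.map (decr r))).length : Int)
    · rw [if_neg (show ¬ (k - (k - kB) > ((nzIdxsFrom 0 (caps.map (decr r))).length : Int)) from by omega),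
          if_neg (show ¬ ((items.length : Int) < kB) from by omega)]
      have h0 : (0 : Int) ≤ kB - 1 := by omega
      have hrange : (kB - 1).toNat < (nzIdxsFrom 0 (caps.map (decr r))).length := by omega
      have hrangeI : (kB - 1).toNat < items.length := by omega
      rw [PySem.List.pyGet?_of_nonneg _ h0]
      rw [List.getElem?_eq_getElem hrangeI]
      simp only [Option.getD_some]
      have hke : k - (k - kB) - 1 = kB - 1 := by ring
      have hvI : items[(kB - 1).toNat].1 = (nzIdxsFrom 0 (caps.map (decr r)))[(kB - 1).toNat] := by
        have h1 : (items.map Prod.fst)[(kB - 1).toNat]? = (nzIdxsFrom 0 (caps.map (decr r)))[(kB - 1).toNat]? := by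
          rw [hfst]
        rw [List.getElem?_map, List.getElem?_eq_getElem hrangeI, List.getElem?_eq_getElem hrange] at h1
        simpa using h1
      rw [hke, List.getD_eq_getElem _ _ hrange, List.length_map, hvI]
      by_cases he : (nzIdxsFrom 0 (caps.map (decr r)))[(kB - 1).toNat] + 1 = (caps.length : Int)
      · rw [if_pos he, if_pos he]
      · rw [if_neg he, if_neg he]; ring
    · rw [if_pos (by omega), if_pos (by omega)]
      rw [decOnce_map_decr r hr caps, hitems, altStep_gItem r hr]
      have h2 : k - kB + ((nzIdxsFrom 0 (caps.map (decr r))).length : Int)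
          = k - (kB - ((nzIdxsFrom 0 (caps.map (decr r))).length : Int)) := by ring
      rw [h2, ← hlen]
      exact ih caps (r+1) (kB - (items.length : Int)) (by omega) (by omega)

theorem map_decr_zero (l : List Int) : l.map (decr 0) = l := by
  rw [List.map_congr_left (fun t _ => decr_zero t)]; exact List.map_id' l

-- ===== VERDICT (by name: the statement is the Claim_ definition above) =====
theorem solution_spec : Claim_equal_solution := by
  intro food_times k _hDom hPre
  unfold Spec_solution solution solution_alt
  rw [init_gItem]
  have := lockstep k k.toNat food_times 0 k (le_refl 0) hPre.1
  rw [map_decr_zero, sub_self] at this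
  exact this
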